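-- pv_equiv track=rewrite | github.com/heoseungjun/AlgorithmStudy | algorithm/src/programmers/recochat.py | solution
-- ===== SOURCE A (Python) =====
-- from collections import deque
--
-- def solution(board):
--     W,H = len(board[0]),len(board)
--     dx,dy = [0,0,-1,1],[-1,1,0,0]
--     Q = deque()
--     V = [[10e9 for _ in range(W)] for _ in range(H)]
--
--     for i in range(H) :
--         for j in range(W) :
--             if board[i][j] == "R" :
--                 Q.append([i,j,0])
--                 V[i][j] = 0
--                 break
--
--     while Q :
--         y,x,dist = Q.popleft()
--
--         if board[y][x] == "G" :
--             return dist
--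
--         for i in range(4) :
--             ny,nx = y,x
--             while 0 <= nx+dx[i] < W and 0 <= ny+dy[i] < H and board[ny+dy[i]][nx+dx[i]] != "D" :
--                 nx += dx[i]
--                 ny += dy[i]
--
--             if V[ny][nx] > dist :
--                 V[ny][nx] = dist + 1
--                 Q.append([ny,nx,dist + 1])
--
--     return -1
-- ===== SOURCE B (Python) =====
-- def solution(board):
--     H = len(board)
--     W = len(board[0])
--
--     # roll-destination tables: for each cell, where the ball stops in each direction
--     right = [[0] * W for _ in range(H)]
--     left = [[0] * W for _ in range(H)]
--     up = [[0] * W for _ in range(H)]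
--     down = [[0] * W for _ in range(H)]
--     for i in range(H):
--         for j in range(W - 1, -1, -1):
--             right[i][j] = j if j + 1 >= W or board[i][j + 1] == "D" else right[i][j + 1]
--         for j in range(W):
--             left[i][j] = j if j - 1 < 0 or board[i][j - 1] == "D" else left[i][j - 1]
--     for j in range(W):
--         for i in range(H - 1, -1, -1):
--             down[i][j] = i if i + 1 >= H or board[i + 1][j] == "D" else down[i + 1][j]
--         for i in range(H):
--             up[i][j] = i if i - 1 < 0 or board[i - 1][j] == "D" else up[i - 1][j]
--
--     start = _find_ball(board, H, W)
--     if start is None: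
--         return -1
--
--     INF = 10 ** 10  # larger than any possible distance
--     dist = {start: 0}
--     queue = [(start[0], start[1], 0)]
--     head = 0
--     while head < len(queue):
--         y, x, d = queue[head]
--         head += 1
--         if board[y][x] == "G":
--             return d
--         for t in ((up[y][x], x), (down[y][x], x), (y, left[y][x]), (y, right[y][x])):
--             if dist.get(t, INF) > d:
--                 dist[t] = d + 1
--                 queue.append((t[0], t[1], d + 1))
--     return -1
--
--
-- def _find_ball(board, H, W):
--     for i in range(H):
--         for j in range(W):
--             if board[i][j] == "R":
--                 return (i, j)
--     return None
-- ===== Notes on version B (the rewrite author's own statement) =====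
-- stated objective: alternative
-- what changed: B precomputes all four roll destinations with per-line DP passes (an explicit adjacency table) and runs the BFS from the single ball cell over that table with a dict of distances, instead of A's re-simulating the slide with an inline while loop at every expansion over a 2D sentinel array; Pre_ excludes boards on which A raises IndexError (empty board, a row shorter than row 0) and boards where 'R' occurs in more than one row, an unspecified multi-ball corner on which A's extra BFS sources (its break only exits the inner loop) and B's single first ball are equally defensible.
-- outside the precondition, e.g. on solution(['DDG', 'RD']): A returns -1, B raises IndexError; on solution(['RDG', 'R.G']): A returns 1, B returns 2
import Mathlib
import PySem

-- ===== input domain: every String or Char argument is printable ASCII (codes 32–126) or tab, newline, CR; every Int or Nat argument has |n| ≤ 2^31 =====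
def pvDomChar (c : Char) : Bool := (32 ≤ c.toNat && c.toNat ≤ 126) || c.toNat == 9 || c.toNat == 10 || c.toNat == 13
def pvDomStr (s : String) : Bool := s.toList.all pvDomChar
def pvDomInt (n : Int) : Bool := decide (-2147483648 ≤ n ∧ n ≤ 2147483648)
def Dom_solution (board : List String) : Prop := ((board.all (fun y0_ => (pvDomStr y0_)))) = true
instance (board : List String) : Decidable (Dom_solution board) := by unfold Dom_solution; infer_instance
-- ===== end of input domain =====

-- B precomputes all four roll destinations with per-line DP passes and runs the BFS from
-- the single ball cell over that table with a dict of distances (alternative decomposition,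
-- same return value on Pre_).

-- ===== PORT A =====
-- board[i][j] as a Char (Python's board[i][j] == "X" compares 1-char strings);
-- total form with defaults, indices are in range wherever the ports evaluate it under Pre_.
def pvCell (board : List String) (i j : Int) : Char :=
  PySem.List.pyGetD (((PySem.List.pyGet? board i).map String.toList).getD []) j ' '

-- V[y][x] read / write on the 2D list (in range under Pre_)
def pvVget (V : List (List Int)) (y x : Int) : Int :=
  PySem.List.pyGetD (PySem.List.pyGetD V y []) x 0

def pvVset (V : List (List Int)) (y x v : Int) : List (List Int) :=
  PySem.List.pySetD V y (PySem.List.pySetD (PySem.List.pyGetD V y []) x v)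

-- A's inner while loop: slide from (ny, nx) one step at a time (fueled; the fuel
-- (W+H).toNat+1 handed to it by pvStepA exceeds any possible number of slide steps)
def pvRollA (board : List String) (W H dy dx : Int) : Nat → Int → Int → Int × Int
  | 0, ny, nx => (ny, nx)
  | f + 1, ny, nx =>
    if 0 ≤ nx + dx ∧ nx + dx < W ∧ 0 ≤ ny + dy ∧ ny + dy < H ∧
        pvCell board (ny + dy) (nx + dx) ≠ 'D' then
      pvRollA board W H dy dx f (ny + dy) (nx + dx)
    else (ny, nx)

-- body of A's 'for i in range(4)' (dx/dy looked up in the literal lists, as in A)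
def pvStepA (board : List String) (W H y x d : Int)
    (st : List (List Int) × List (Int × Int × Int)) (i : Int) :
    List (List Int) × List (Int × Int × Int) :=
  let dxi := PySem.List.pyGetD [0, 0, -1, 1] i 0
  let dyi := PySem.List.pyGetD [-1, 1, 0, 0] i 0
  let p := pvRollA board W H dyi dxi ((W + H).toNat + 1) y x
  if pvVget st.1 p.1 p.2 > d then
    (pvVset st.1 p.1 p.2 (d + 1), st.2 ++ [(p.1, p.2, d + 1)])
  else st

-- A's 'while Q:' loop (fueled; the fuel passed by 'solution' exceeds the number of pops)
def pvLoopA (board : List String) (W H : Int) :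
    Nat → List (Int × Int × Int) → List (List Int) → Int
  | 0, _, _ => -1
  | _ + 1, [], _ => -1
  | f + 1, (y, x, d) :: Q, V =>
    if pvCell board y x = 'G' then d
    else
      let st := (PySem.List.pyRange 0 4 1).foldl (pvStepA board W H y x d) (V, Q)
      pvLoopA board W H f st.2 st.1

-- A's inner 'for j in range(W): if board[i][j] == "R": …; break' (break as Option state)
def pvFindR_A (board : List String) (W i : Int) : Option Int :=
  (PySem.List.pyRange 0 W 1).foldl
    (fun st j =>
      match st with
      | some _ => st
      | none => if pvCell board i j = 'R' then some j else none)
    none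

-- A's source scan: builds Q and V together, V starts as H×W of 10e9 (= 10^10, exact)
def pvInitA (board : List String) (W H : Int) :
    List (Int × Int × Int) × List (List Int) :=
  (PySem.List.pyRange 0 H 1).foldl
    (fun st i =>
      match pvFindR_A board W i with
      | some j => (st.1 ++ [(i, j, (0 : Int))], pvVset st.2 i j 0)
      | none => st)
    ([], List.replicate H.toNat (List.replicate W.toNat (10000000000 : Int)))

def solution (board : List String) : Int :=
  let W : Int := ((PySem.List.pyGet? board 0).getD "").toList.length
  let H : Int := board.length
  let init := pvInitA board W H
  pvLoopA board W H ((H.toNat + W.toNat + 1) * 4 ^ (H.toNat * W.toNat + 1)) init.1 init.2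

-- ===== PORT B =====
-- B's DP tables right/left/down/up, ported as their defining recurrences
-- (identical values; computed on demand instead of stored in the 2D arrays)
def pvRightT (board : List String) (W i j : Int) : Int :=
  if W ≤ j + 1 ∨ pvCell board i (j + 1) = 'D' then j else pvRightT board W i (j + 1)
termination_by (W - j).toNat
decreasing_by omega

def pvLeftT (board : List String) (i j : Int) : Int :=
  if j - 1 < 0 ∨ pvCell board i (j - 1) = 'D' then j else pvLeftT board i (j - 1)
termination_by j.toNat
decreasing_by omega

def pvDownT (board : List String) (H i j : Int) : Int :=
  if H ≤ i + 1 ∨ pvCell board (i + 1) j = 'D' then i else pvDownT board H (i + 1) j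
termination_by (H - i).toNat
decreasing_by omega

def pvUpT (board : List String) (i j : Int) : Int :=
  if i - 1 < 0 ∨ pvCell board (i - 1) j = 'D' then i else pvUpT board (i - 1) j
termination_by i.toNat
decreasing_by omega

-- the 4-tuple 'for t in ((up[y][x], x), …)' of B
def pvTargetsB (board : List String) (W H y x : Int) : List (Int × Int) :=
  [(pvUpT board y x, x), (pvDownT board H y x, x), (y, pvLeftT board y x), (y, pvRightT board W y x)]

-- body of B's 'for t in (…)': relax through the dict (INF = 10**10)
def pvStepB (d : Int) (st : List (Int × Int × Int) × PySem.Dict (Int × Int) Int)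
    (t : Int × Int) : List (Int × Int × Int) × PySem.Dict (Int × Int) Int :=
  if st.2.getD t 10000000000 > d then (st.1 ++ [(t.1, t.2, d + 1)], st.2.insert t (d + 1))
  else st

-- B's 'while head < len(queue):' (a list consumed from the front; same traversal), fueled
def pvLoopB (board : List String) (W H : Int) :
    Nat → List (Int × Int × Int) → PySem.Dict (Int × Int) Int → Int
  | 0, _, _ => -1
  | _ + 1, [], _ => -1
  | f + 1, (y, x, d) :: Q, dd =>
    if pvCell board y x = 'G' then d
    else
      let st := (pvTargetsB board W H y x).foldl (pvStepB d) (Q, dd)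
      pvLoopB board W H f st.1 st.2

-- B's _find_ball: nested 'for i in range(H): for j in range(W): … return (i, j)'
def pvFindBall (board : List String) (W H : Int) : Option (Int × Int) :=
  (PySem.List.pyRange 0 H 1).findSome? (fun i =>
    ((PySem.List.pyRange 0 W 1).find? (fun j => pvCell board i j == 'R')).map (fun j => (i, j)))

def solution_alt (board : List String) : Int :=
  let H : Int := board.length
  let W : Int := ((PySem.List.pyGet? board 0).getD "").toList.length
  match pvFindBall board W H with
  | none => -1
  | some (i, j) =>
      pvLoopB board W H ((H.toNat + W.toNat + 1) * 4 ^ (H.toNat * W.toNat + 1))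
        [(i, j, 0)] ((PySem.Dict.empty : PySem.Dict (Int × Int) Int).insert (i, j) 0)

-- ===== PRECONDITION & SPEC =====
-- Pre_ excludes (a) the empty board and ragged boards with a row shorter than row 0, on which
-- A raises IndexError (board[0], or grid indexing during the scan/roll) on almost all of them
-- while B's table build always raises there; and (b) boards where 'R' occurs (within the first
-- W columns) in more than one row — an unspecified multi-ball corner on which A's seeding of
-- one source per such row (its break exits only the inner loop) and B's single first ball are
-- equally defensible choices.
def Pre_solution (board : List String) : Prop :=
  board ≠ [] ∧ (∀ s ∈ board, ((board.headD "").toList.length ≤ s.toList.length)) ∧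
    board.countP (fun s => (s.toList.take (board.headD "").toList.length).contains 'R') ≤ 1

instance (board : List String) : Decidable (Pre_solution board) := by
  unfold Pre_solution; infer_instance

def pvWitness_solution : List String := (["RG"])

def Spec_solution (board : List String) (out : Int) : Prop := out = solution_alt board
instance (board : List String) (out : Int) : Decidable (Spec_solution board out) := by
  unfold Spec_solution; infer_instance

-- ===== CLAIM (what is proved, stated in full; the proofs are below) =====
def Claim_equal_solution : Prop :=
  ∀ (board : List String), Dom_solution board → Pre_solution board →
    Spec_solution board (solution board)

-- ===== LEMMAS AND PROOFS =====

-- distance map relation: A's 2D array agrees with B's dict (10^10 = the 10e9 sentinel)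
def pvRel (H W : Int) (V : List (List Int)) (dd : PySem.Dict (Int × Int) Int) : Prop :=
  ∀ y x : Int, 0 ≤ y → y < H → 0 ≤ x → x < W →
    pvVget V y x = dd.getD (y, x) 10000000000

def pvVwf (H W : Int) (V : List (List Int)) : Prop :=
  V.length = H.toNat ∧ ∀ r ∈ V, r.length = W.toNat

def pvQwf (H W : Int) (Q : List (Int × Int × Int)) : Prop :=
  ∀ e ∈ Q, 0 ≤ e.1 ∧ e.1 < H ∧ 0 ≤ e.2.1 ∧ e.2.1 < W

lemma pvVget_replicate (H W : Int) (c : Int) (y x : Int)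
    (hy0 : 0 ≤ y) (hyH : y < H) (hx0 : 0 ≤ x) (hxW : x < W) :
    pvVget (List.replicate H.toNat (List.replicate W.toNat c)) y x = c := by
  unfold pvVget
  rw [PySem.List.pyGetD_eq_getElem _ _ hy0 (by simp; omega)]
  rw [List.getElem_replicate]
  rw [PySem.List.pyGetD_eq_getElem _ _ hx0 (by simp; omega)]
  rw [List.getElem_replicate]

lemma pvVwf_replicate (H W : Int) (c : Int) :
    pvVwf H W (List.replicate H.toNat (List.replicate W.toNat c)) := by
  refine ⟨by simp, ?_⟩
  intro r hr
  simp only [List.mem_replicate] at hr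
  rw [hr.2]; simp

lemma pvVwf_set (H W : Int) (V : List (List Int)) (a b v : Int)
    (ha0 : 0 ≤ a) (haH : a < H) (h : pvVwf H W V) :
    pvVwf H W (pvVset V a b v) := by
  obtain ⟨h1, h2⟩ := h
  unfold pvVset
  rw [PySem.List.pySetD_of_nonneg _ _ ha0]
  refine ⟨by simpa using h1, ?_⟩
  intro r hr
  rcases List.mem_or_eq_of_mem_set hr with hr' | hr'
  · exact h2 r hr'
  · subst hr'
    rw [PySem.List.length_pySetD]
    rw [PySem.List.pyGetD_eq_getElem _ _ ha0 (by omega)]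
    exact h2 _ (List.getElem_mem _)

lemma pvVget_set (H W : Int) (V : List (List Int)) (a b v y x : Int)
    (h : pvVwf H W V)
    (ha0 : 0 ≤ a) (haH : a < H) (hb0 : 0 ≤ b) (hbW : b < W)
    (hy0 : 0 ≤ y) (hyH : y < H) (hx0 : 0 ≤ x) (hxW : x < W) :
    pvVget (pvVset V a b v) y x = if y = a ∧ x = b then v else pvVget V y x := by
  obtain ⟨h1, h2⟩ := h
  have haL : a < (V.length : Int) := by omega
  have hyL : y < (V.length : Int) := by omega
  unfold pvVget pvVset
  rw [PySem.List.pySetD_of_nonneg _ _ ha0,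
      PySem.List.pyGetD_eq_getElem _ _ ha0 haL,
      PySem.List.pySetD_of_nonneg _ _ hb0,
      PySem.List.pyGetD_eq_getElem _ _ hy0 (by simpa using hyL),
      List.getElem_set,
      PySem.List.pyGetD_eq_getElem _ _ hy0 hyL]
  have hrow : V[y.toNat].length = W.toNat := h2 _ (List.getElem_mem _)
  by_cases hya : a.toNat = y.toNat
  · have hya' : y = a := by omega
    rw [if_pos hya]
    simp only [show a.toNat = y.toNat from hya]
    rw [PySem.List.pyGetD_eq_getElem _ _ hx0 (by rw [List.length_set]; omega)]
    rw [List.getElem_set]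
    by_cases hxb : b.toNat = x.toNat
    · have hxb' : x = b := by omega
      rw [if_pos hxb, if_pos ⟨hya', hxb'⟩]
    · have hxb' : ¬ (y = a ∧ x = b) := by omega
      rw [if_neg hxb, if_neg hxb']
      rw [PySem.List.pyGetD_eq_getElem _ _ hx0 (by omega)]
  · have hya' : ¬ (y = a ∧ x = b) := by omega
    rw [if_neg hya, if_neg hya']

-- table range lemmas
lemma pvUpT_range (board : List String) (i j : Int) (h : 0 ≤ i) :
    0 ≤ pvUpT board i j ∧ pvUpT board i j ≤ i := by
  fun_induction pvUpT board i j with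
  | case1 x hc => omega
  | case2 x hc ih => have := ih; omega

lemma pvDownT_range (board : List String) (H i j : Int) (h : i < H) :
    i ≤ pvDownT board H i j ∧ pvDownT board H i j < H := by
  fun_induction pvDownT board H i j with
  | case1 x hc => omega
  | case2 x hc ih => have := ih (by omega); omega

lemma pvLeftT_range (board : List String) (i j : Int) (h : 0 ≤ j) :
    0 ≤ pvLeftT board i j ∧ pvLeftT board i j ≤ j := by
  fun_induction pvLeftT board i j with
  | case1 x hc => omega
  | case2 x hc ih => have := ih; omega

lemma pvRightT_range (board : List String) (W i j : Int) (h : j < W) :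
    j ≤ pvRightT board W i j ∧ pvRightT board W i j < W := by
  fun_induction pvRightT board W i j with
  | case1 x hc => omega
  | case2 x hc ih => have := ih (by omega); omega

-- A's slide equals B's table, one lemma per direction
lemma pvRoll_up (board : List String) (W H : Int) :
    ∀ (f : Nat) (y x : Int), 0 ≤ y → y < H → 0 ≤ x → x < W → y < (f : Int) →
    pvRollA board W H (-1) 0 f y x = (pvUpT board y x, x) := by
  intro f
  induction f with
  | zero => intro y x h1 h2 h3 h4 h5; simp at h5; omega
  | succ f ih =>
    intro y x h1 h2 h3 h4 h5
    rw [pvRollA, pvUpT]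
    simp only [show y + -1 = y - 1 from by ring, show x + 0 = x from by ring]
    by_cases hc : y - 1 < 0 ∨ pvCell board (y - 1) x = 'D'
    · rw [if_pos hc, if_neg (by
        rintro ⟨c1, c2, c3, c4, c5⟩
        rcases hc with hc | hc
        · omega
        · exact c5 hc)]
    · rw [not_or] at hc
      rw [if_pos ⟨h3, h4, by omega, by omega, hc.2⟩, if_neg (by tauto)]
      exact ih (y - 1) x (by omega) (by omega) h3 h4 (by push_cast at h5 ⊢; omega)

lemma pvRoll_down (board : List String) (W H : Int) :
    ∀ (f : Nat) (y x : Int), 0 ≤ y → y < H → 0 ≤ x → x < W → H - y ≤ (f : Int) →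
    pvRollA board W H 1 0 f y x = (pvDownT board H y x, x) := by
  intro f
  induction f with
  | zero => intro y x h1 h2 h3 h4 h5; simp at h5; omega
  | succ f ih =>
    intro y x h1 h2 h3 h4 h5
    rw [pvRollA, pvDownT]
    simp only [show x + 0 = x from by ring]
    by_cases hc : H ≤ y + 1 ∨ pvCell board (y + 1) x = 'D'
    · rw [if_pos hc, if_neg (by
        rintro ⟨c1, c2, c3, c4, c5⟩
        rcases hc with hc | hc
        · omega
        · exact c5 hc)]
    · rw [not_or] at hc
      rw [if_pos ⟨h3, h4, by omega, by omega, hc.2⟩, if_neg (by tauto)]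
      exact ih (y + 1) x (by omega) (by omega) h3 h4 (by push_cast at h5 ⊢; omega)

lemma pvRoll_left (board : List String) (W H : Int) :
    ∀ (f : Nat) (y x : Int), 0 ≤ y → y < H → 0 ≤ x → x < W → x < (f : Int) →
    pvRollA board W H 0 (-1) f y x = (y, pvLeftT board y x) := by
  intro f
  induction f with
  | zero => intro y x h1 h2 h3 h4 h5; simp at h5; omega
  | succ f ih =>
    intro y x h1 h2 h3 h4 h5
    rw [pvRollA, pvLeftT]
    simp only [show x + -1 = x - 1 from by ring, show y + 0 = y from by ring]
    by_cases hc : x - 1 < 0 ∨ pvCell board y (x - 1) = 'D'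
    · rw [if_pos hc, if_neg (by
        rintro ⟨c1, c2, c3, c4, c5⟩
        rcases hc with hc | hc
        · omega
        · exact c5 hc)]
    · rw [not_or] at hc
      rw [if_pos ⟨by omega, by omega, h1, h2, hc.2⟩, if_neg (by tauto)]
      exact ih y (x - 1) h1 h2 (by omega) (by omega) (by push_cast at h5 ⊢; omega)

lemma pvRoll_right (board : List String) (W H : Int) :
    ∀ (f : Nat) (y x : Int), 0 ≤ y → y < H → 0 ≤ x → x < W → W - x ≤ (f : Int) →
    pvRollA board W H 0 1 f y x = (y, pvRightT board W y x) := by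
  intro f
  induction f with
  | zero => intro y x h1 h2 h3 h4 h5; simp at h5; omega
  | succ f ih =>
    intro y x h1 h2 h3 h4 h5
    rw [pvRollA, pvRightT]
    simp only [show y + 0 = y from by ring]
    by_cases hc : W ≤ x + 1 ∨ pvCell board y (x + 1) = 'D'
    · rw [if_pos hc, if_neg (by
        rintro ⟨c1, c2, c3, c4, c5⟩
        rcases hc with hc | hc
        · omega
        · exact c5 hc)]
    · rw [not_or] at hc
      rw [if_pos ⟨by omega, by omega, h1, h2, hc.2⟩, if_neg (by tauto)]
      exact ih y (x + 1) h1 h2 (by omega) (by omega) (by push_cast at h5 ⊢; omega)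

-- combined state relation through the expansion
def pvSRel (H W : Int) (a : List (List Int) × List (Int × Int × Int))
    (b : List (Int × Int × Int) × PySem.Dict (Int × Int) Int) : Prop :=
  a.2 = b.1 ∧ pvRel H W a.1 b.2 ∧ pvVwf H W a.1 ∧ pvQwf H W a.2

lemma pvUpd_rel (H W : Int) (a : List (List Int) × List (Int × Int × Int))
    (b : List (Int × Int × Int) × PySem.Dict (Int × Int) Int)
    (t : Int × Int) (d : Int)
    (ht1 : 0 ≤ t.1) (ht2 : t.1 < H) (ht3 : 0 ≤ t.2) (ht4 : t.2 < W)
    (h : pvSRel H W a b) :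
    pvSRel H W
      (if pvVget a.1 t.1 t.2 > d then (pvVset a.1 t.1 t.2 (d + 1), a.2 ++ [(t.1, t.2, d + 1)]) else a)
      (pvStepB d b t) := by
  obtain ⟨hq, hrel, hwf, hqwf⟩ := h
  unfold pvStepB
  have hv : pvVget a.1 t.1 t.2 = b.2.getD t 10000000000 := by
    have := hrel t.1 t.2 ht1 ht2 ht3 ht4
    simpa using this
  by_cases hcond : pvVget a.1 t.1 t.2 > d
  · rw [if_pos hcond, if_pos (by rw [← hv]; exact hcond)]
    refine ⟨by simp [hq], ?_, pvVwf_set H W a.1 t.1 t.2 (d + 1) ht1 ht2 hwf, ?_⟩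
    · intro y x hy0 hyH hx0 hxW
      rw [pvVget_set H W a.1 t.1 t.2 (d + 1) y x hwf ht1 ht2 ht3 ht4 hy0 hyH hx0 hxW]
      rw [PySem.Dict.getD_insert]
      by_cases he : y = t.1 ∧ x = t.2
      · rw [if_pos he, if_pos (by obtain ⟨e1, e2⟩ := he; subst e1; subst e2; rfl)]
      · rw [if_neg he, if_neg (by
          intro hpe; apply he
          constructor
          · exact congrArg Prod.fst hpe
          · exact congrArg Prod.snd hpe)]
        exact hrel y x hy0 hyH hx0 hxW
    · intro e he
      rcases List.mem_append.mp he with he | he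
      · exact hqwf e he
      · simp only [List.mem_singleton] at he
        subst he
        exact ⟨ht1, ht2, ht3, ht4⟩
  · rw [if_neg hcond, if_neg (by rw [← hv]; exact hcond)]
    exact ⟨hq, hrel, hwf, hqwf⟩

lemma pvExpand_rel (board : List String) (W H : Int)
    (a : List (List Int) × List (Int × Int × Int))
    (b : List (Int × Int × Int) × PySem.Dict (Int × Int) Int)
    (y x d : Int) (hy0 : 0 ≤ y) (hyH : y < H) (hx0 : 0 ≤ x) (hxW : x < W)
    (_hW : 0 ≤ W) (h : pvSRel H W a b) :
    pvSRel H W ((PySem.List.pyRange 0 4 1).foldl (pvStepA board W H y x d) a)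
      ((pvTargetsB board W H y x).foldl (pvStepB d) b) := by
  have hH0 : 0 ≤ H := by omega
  have hfu : y < (((W + H).toNat + 1 : Nat) : Int) := by push_cast; omega
  have hfd : H - y ≤ (((W + H).toNat + 1 : Nat) : Int) := by push_cast; omega
  have hfl : x < (((W + H).toNat + 1 : Nat) : Int) := by push_cast; omega
  have hfr : W - x ≤ (((W + H).toNat + 1 : Nat) : Int) := by push_cast; omega
  have s0 : ∀ st, pvStepA board W H y x d st 0 =
      if pvVget st.1 (pvUpT board y x, x).1 (pvUpT board y x, x).2 > d then
        (pvVset st.1 (pvUpT board y x, x).1 (pvUpT board y x, x).2 (d + 1),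
          st.2 ++ [((pvUpT board y x, x).1, (pvUpT board y x, x).2, d + 1)])
      else st := by
    intro st
    simp only [pvStepA,
      show PySem.List.pyGetD [(0 : Int), 0, -1, 1] 0 0 = 0 from by decide,
      show PySem.List.pyGetD [(-1 : Int), 1, 0, 0] 0 0 = -1 from by decide,
      pvRoll_up board W H ((W + H).toNat + 1) y x hy0 hyH hx0 hxW hfu]
  have s1 : ∀ st, pvStepA board W H y x d st 1 =
      if pvVget st.1 (pvDownT board H y x, x).1 (pvDownT board H y x, x).2 > d then
        (pvVset st.1 (pvDownT board H y x, x).1 (pvDownT board H y x, x).2 (d + 1),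
          st.2 ++ [((pvDownT board H y x, x).1, (pvDownT board H y x, x).2, d + 1)])
      else st := by
    intro st
    simp only [pvStepA,
      show PySem.List.pyGetD [(0 : Int), 0, -1, 1] 1 0 = 0 from by decide,
      show PySem.List.pyGetD [(-1 : Int), 1, 0, 0] 1 0 = 1 from by decide,
      pvRoll_down board W H ((W + H).toNat + 1) y x hy0 hyH hx0 hxW hfd]
  have s2 : ∀ st, pvStepA board W H y x d st 2 =
      if pvVget st.1 (y, pvLeftT board y x).1 (y, pvLeftT board y x).2 > d then
        (pvVset st.1 (y, pvLeftT board y x).1 (y, pvLeftT board y x).2 (d + 1),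
          st.2 ++ [((y, pvLeftT board y x).1, (y, pvLeftT board y x).2, d + 1)])
      else st := by
    intro st
    simp only [pvStepA,
      show PySem.List.pyGetD [(0 : Int), 0, -1, 1] 2 0 = -1 from by decide,
      show PySem.List.pyGetD [(-1 : Int), 1, 0, 0] 2 0 = 0 from by decide,
      pvRoll_left board W H ((W + H).toNat + 1) y x hy0 hyH hx0 hxW hfl]
  have s3 : ∀ st, pvStepA board W H y x d st 3 =
      if pvVget st.1 (y, pvRightT board W y x).1 (y, pvRightT board W y x).2 > d then
        (pvVset st.1 (y, pvRightT board W y x).1 (y, pvRightT board W y x).2 (d + 1),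
          st.2 ++ [((y, pvRightT board W y x).1, (y, pvRightT board W y x).2, d + 1)])
      else st := by
    intro st
    simp only [pvStepA,
      show PySem.List.pyGetD [(0 : Int), 0, -1, 1] 3 0 = 1 from by decide,
      show PySem.List.pyGetD [(-1 : Int), 1, 0, 0] 3 0 = 0 from by decide,
      pvRoll_right board W H ((W + H).toNat + 1) y x hy0 hyH hx0 hxW hfr]
  rw [show PySem.List.pyRange 0 4 1 = [0, 1, 2, 3] from by decide]
  unfold pvTargetsB
  simp only [List.foldl_cons, List.foldl_nil]
  rw [s0, s1, s2, s3]
  have hu := pvUpT_range board y x hy0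
  have hd := pvDownT_range board H y x hyH
  have hl := pvLeftT_range board y x hx0
  have hr := pvRightT_range board W y x hxW
  exact pvUpd_rel H W _ _ (y, pvRightT board W y x) d hy0 hyH (by simp; omega) (by simp; omega)
    (pvUpd_rel H W _ _ (y, pvLeftT board y x) d hy0 hyH (by simp; omega) (by simp; omega)
      (pvUpd_rel H W _ _ (pvDownT board H y x, x) d (by simp; omega) (by simp; omega) hx0 hxW
        (pvUpd_rel H W _ _ (pvUpT board y x, x) d (by simp; omega) (by simp; omega) hx0 hxW h)))

lemma pvLoop_rel (board : List String) (W H : Int) (hW : 0 ≤ W) :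
    ∀ (f : Nat) (Q : List (Int × Int × Int)) (V : List (List Int))
      (dd : PySem.Dict (Int × Int) Int),
      pvRel H W V dd → pvVwf H W V → pvQwf H W Q →
      pvLoopA board W H f Q V = pvLoopB board W H f Q dd := by
  intro f
  induction f with
  | zero => intro Q V dd _ _ _; rfl
  | succ f ih =>
    intro Q V dd hrel hwf hqwf
    rcases Q with _ | ⟨⟨y, x, d⟩, Q⟩
    · rfl
    · rw [pvLoopA, pvLoopB]
      obtain ⟨hy0, hyH, hx0, hxW⟩ := hqwf (y, x, d) List.mem_cons_self
      by_cases hg : pvCell board y x = 'G'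
      · rw [if_pos hg, if_pos hg]
      · rw [if_neg hg, if_neg hg]
        dsimp only
        have hexp := pvExpand_rel board W H (V, Q) (Q, dd) y x d hy0 hyH hx0 hxW hW
          ⟨rfl, hrel, hwf, fun e he => hqwf e (List.mem_cons_of_mem _ he)⟩
        obtain ⟨hq', hrel', hwf', hqwf'⟩ := hexp
        rw [← hq']
        exact ih _ _ _ hrel' hwf' hqwf'

-- A's break-encoded row scan is a find? over the same range
lemma pvFoldBreak_some (board : List String) (i : Int) (l : List Int) (a : Int) :
    l.foldl (fun st j =>
      match st with
      | some _ => st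
      | none => if pvCell board i j = 'R' then some j else none) (some a) = some a := by
  induction l with
  | nil => rfl
  | cons j l ih => simpa using ih

lemma pvFindRA_find? (board : List String) (W i : Int) :
    pvFindR_A board W i
      = (PySem.List.pyRange 0 W 1).find? (fun j => pvCell board i j == 'R') := by
  unfold pvFindR_A
  generalize PySem.List.pyRange 0 W 1 = l
  induction l with
  | nil => rfl
  | cons j l ih =>
    simp only [List.foldl_cons, List.find?_cons]
    by_cases hr : pvCell board i j = 'R'
    · rw [if_pos hr]
      rw [show (pvCell board i j == 'R') = true from by simp [hr]]
      exact pvFoldBreak_some board i l j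
    · rw [if_neg hr]
      rw [show (pvCell board i j == 'R') = false from by simp [hr]]
      exact ih

-- B's row-major scan written via pvFindR_A
lemma pvFindBall_eq (board : List String) (W H : Int) :
    pvFindBall board W H
      = (PySem.List.pyRange 0 H 1).findSome?
          (fun i => (pvFindR_A board W i).map (fun j => (i, j))) := by
  unfold pvFindBall
  simp only [pvFindRA_find?]

-- if no row of l carries the ball, A's source fold is the identity
lemma pvFoldNone (board : List String) (W : Int) :
    ∀ (l : List Int) (st : List (Int × Int × Int) × List (List Int)),
      (∀ i ∈ l, pvFindR_A board W i = none) →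
      l.foldl (fun st i =>
        match pvFindR_A board W i with
        | some j => (st.1 ++ [(i, j, (0 : Int))], pvVset st.2 i j 0)
        | none => st) st = st := by
  intro l
  induction l with
  | nil => intro st _; rfl
  | cons a l ih =>
    intro st h
    simp only [List.foldl_cons, h a List.mem_cons_self]
    exact ih st (fun i hi => h i (List.mem_cons_of_mem _ hi))

-- with at most one ball-carrying row, A's source fold adds exactly the first one
lemma pvInitFold (board : List String) (W : Int) :
    ∀ (l : List Int) (Q : List (Int × Int × Int)) (V : List (List Int)),
      l.countP (fun i => (pvFindR_A board W i).isSome) ≤ 1 →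
      l.foldl (fun st i =>
        match pvFindR_A board W i with
        | some j => (st.1 ++ [(i, j, (0 : Int))], pvVset st.2 i j 0)
        | none => st) (Q, V) =
      match l.findSome? (fun i => (pvFindR_A board W i).map (fun j => (i, j))) with
      | none => (Q, V)
      | some (i, j) => (Q ++ [(i, j, 0)], pvVset V i j 0) := by
  intro l
  induction l with
  | nil => intro Q V _; rfl
  | cons a l ih =>
    intro Q V hcnt
    rw [List.foldl_cons, List.findSome?_cons]
    cases ha : pvFindR_A board W a with
    | none =>
      simp only [Option.map_none]
      refine ih Q V ?_
      rw [List.countP_cons, ha] at hcnt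
      simpa using hcnt
    | some j =>
      simp only [Option.map_some]
      have hzero : l.countP (fun i => (pvFindR_A board W i).isSome) = 0 := by
        rw [List.countP_cons, ha] at hcnt
        simp only [Option.isSome_some, if_pos] at hcnt
        omega
      have hnone : ∀ i ∈ l, pvFindR_A board W i = none := by
        intro i hi
        have := List.countP_eq_zero.mp hzero i hi
        simpa using this
      exact pvFoldNone board W l _ hnone

-- Pre_'s row predicate coincides with 'pvFindR_A returns a ball' (rows read via pyGetD)
lemma pvRowPred_eq (board : List String) (W i : Int)
    (h0 : 0 ≤ i) (hH : i < (board.length : Int)) :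
    (pvFindR_A board W i).isSome
      = (((PySem.List.pyGetD board i "").toList.take W.toNat).contains 'R') := by
  have hrow : ∀ j, pvCell board i j
      = PySem.List.pyGetD (PySem.List.pyGetD board i "").toList j ' ' := by
    intro j
    unfold pvCell
    rw [PySem.List.pyGet?_eq_some_getElem board h0 hH,
        PySem.List.pyGetD_eq_getElem board "" h0 hH]
    rfl
  set s := (PySem.List.pyGetD board i "").toList with hs
  rw [pvFindRA_find?, Bool.eq_iff_iff, List.find?_isSome, List.contains_iff_mem]
  constructor
  · rintro ⟨j, hj, hjR⟩
    rw [PySem.List.mem_pyRange_one] at hj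
    rw [hrow j] at hjR
    simp only [beq_iff_eq] at hjR
    by_cases hlen : j < (s.length : Int)
    · rw [PySem.List.pyGetD_eq_getElem s ' ' hj.1 hlen] at hjR
      have : 'R' ∈ s.take W.toNat := by
        rw [List.mem_take_iff_getElem]
        exact ⟨j.toNat, by omega, hjR⟩
      exact this
    · rw [PySem.List.pyGetD_of_nonneg _ _ hj.1] at hjR
      rw [List.getD_eq_default _ _ (by omega)] at hjR
      exact absurd hjR (by decide)
  · intro hmem
    rw [List.mem_take_iff_getElem] at hmem
    obtain ⟨k, hk, hks⟩ := hmem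
    refine ⟨(k : Int), ?_, ?_⟩
    · rw [PySem.List.mem_pyRange_one]
      exact ⟨Int.natCast_nonneg k, by omega⟩
    · rw [hrow, PySem.List.pyGetD_natCast]
      simp only [beq_iff_eq]
      rw [List.getD_eq_getElem _ _ (by omega)]
      exact hks

-- the countP over row indices is Pre_'s countP over the rows themselves
lemma pvCount_eq (board : List String) (W : Int) :
    (PySem.List.pyRange 0 (board.length : Int) 1).countP
        (fun i => (pvFindR_A board W i).isSome)
      = board.countP (fun s => (s.toList.take W.toNat).contains 'R') := by
  have h1 : (PySem.List.pyRange 0 (board.length : Int) 1).countP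
        (fun i => (pvFindR_A board W i).isSome)
      = (PySem.List.pyRange 0 (board.length : Int) 1).countP
        (fun i => ((PySem.List.pyGetD board i "").toList.take W.toNat).contains 'R') := by
    apply List.countP_congr
    intro i hi
    rw [PySem.List.mem_pyRange_one] at hi
    rw [pvRowPred_eq board W i hi.1 hi.2]
  rw [h1]
  have h2 := PySem.List.map_pyGetD_pyRange_zero board ""
  calc (PySem.List.pyRange 0 (board.length : Int) 1).countP
        (fun i => ((PySem.List.pyGetD board i "").toList.take W.toNat).contains 'R')
      = ((PySem.List.pyRange 0 (board.length : Int) 1).map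
          (fun i => PySem.List.pyGetD board i "")).countP
          (fun s => (s.toList.take W.toNat).contains 'R') := by
        rw [List.countP_map]
        rfl
    _ = board.countP (fun s => (s.toList.take W.toNat).contains 'R') := by
        rw [PySem.List.len_eq] at h2
        rw [h2]

-- enqueueing the source preserves the relation
lemma pvSrc_rel (H W : Int) (V : List (List Int)) (QA QB : List (Int × Int × Int))
    (dd : PySem.Dict (Int × Int) Int) (i j : Int)
    (hi0 : 0 ≤ i) (hiH : i < H) (hj0 : 0 ≤ j) (hjW : j < W)
    (h : pvSRel H W (V, QA) (QB, dd)) :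
    pvSRel H W (pvVset V i j 0, QA ++ [(i, j, 0)]) (QB ++ [(i, j, 0)], dd.insert (i, j) 0) := by
  obtain ⟨hq, hrel, hwf, hqwf⟩ := h
  refine ⟨by simp only at hq ⊢; rw [hq], ?_, pvVwf_set H W V i j 0 hi0 hiH hwf, ?_⟩
  · intro y x hy0 hyH hx0 hxW
    rw [pvVget_set H W V i j 0 y x hwf hi0 hiH hj0 hjW hy0 hyH hx0 hxW]
    rw [PySem.Dict.getD_insert]
    by_cases he : y = i ∧ x = j
    · rw [if_pos he, if_pos (by obtain ⟨e1, e2⟩ := he; subst e1; subst e2; rfl)]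
    · rw [if_neg he, if_neg (by
        intro hpe; apply he
        exact ⟨congrArg Prod.fst hpe, congrArg Prod.snd hpe⟩)]
      exact hrel y x hy0 hyH hx0 hxW
  · intro e he
    rcases List.mem_append.mp he with he | he
    · exact hqwf e he
    · simp only [List.mem_singleton] at he
      subst he
      exact ⟨hi0, hiH, hj0, hjW⟩

-- the empty-start relation
lemma pvEmpty_rel (H W : Int) :
    pvSRel H W
      (List.replicate H.toNat (List.replicate W.toNat (10000000000 : Int)), [])
      ([], (PySem.Dict.empty : PySem.Dict (Int × Int) Int)) := by
  refine ⟨rfl, ?_, pvVwf_replicate H W _, ?_⟩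
  · intro y x hy0 hyH hx0 hxW
    rw [PySem.Dict.getD_empty]
    exact pvVget_replicate H W _ y x hy0 hyH hx0 hxW
  · intro e he
    simp at he

-- ===== VERDICT (by name: the statement is the Claim_ definition above) =====
theorem solution_spec : Claim_equal_solution := by
  intro board _ hpre
  obtain ⟨hne, hlen, hcnt⟩ := hpre
  unfold Spec_solution solution solution_alt
  dsimp only
  set W : Int := (((PySem.List.pyGet? board 0).getD "").toList.length : Int) with hWdef
  set H : Int := (board.length : Int) with hHdef
  have hW0 : 0 ≤ W := Int.natCast_nonneg _
  have hH0 : 0 ≤ H := Int.natCast_nonneg _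
  have hhead : (PySem.List.pyGet? board 0).getD "" = board.headD "" := by
    cases board with
    | nil => exact absurd rfl hne
    | cons b bs => simp [PySem.List.pyGet?, PySem.List.pyIdx?]
  have hWtake : W.toNat = (board.headD "").toList.length := by
    rw [hWdef, hhead]; omega
  -- the source fold
  have hcnt' : (PySem.List.pyRange 0 H 1).countP
      (fun i => (pvFindR_A board W i).isSome) ≤ 1 := by
    rw [hHdef, pvCount_eq board W, hWtake]
    exact hcnt
  have hinit : pvInitA board W H =
      match (PySem.List.pyRange 0 H 1).findSome?
          (fun i => (pvFindR_A board W i).map (fun j => (i, j))) with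
      | none => ([], List.replicate H.toNat (List.replicate W.toNat (10000000000 : Int)))
      | some (i, j) => ([(i, j, 0)],
          pvVset (List.replicate H.toNat (List.replicate W.toNat (10000000000 : Int))) i j 0) := by
    unfold pvInitA
    rw [pvInitFold board W _ _ _ hcnt']
    cases (PySem.List.pyRange 0 H 1).findSome?
        (fun i => (pvFindR_A board W i).map (fun j => (i, j))) with
    | none => rfl
    | some p => cases p with | mk i j => simp
  rw [pvFindBall_eq]
  cases hfs : (PySem.List.pyRange 0 H 1).findSome?
      (fun i => (pvFindR_A board W i).map (fun j => (i, j))) with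
  | none =>
    rw [hinit, hfs]
    have hfuel : (H.toNat + W.toNat + 1) * 4 ^ (H.toNat * W.toNat + 1) ≠ 0 := by positivity
    obtain ⟨f, hf⟩ := Nat.exists_eq_succ_of_ne_zero hfuel
    rw [hf]
    rfl
  | some p =>
    obtain ⟨i, j⟩ := p
    -- bounds for (i, j)
    obtain ⟨a, ha, hfa⟩ := List.exists_of_findSome?_eq_some hfs
    rw [PySem.List.mem_pyRange_one] at ha
    have hia : i = a ∧ pvFindR_A board W a = some j := by
      cases hRa : pvFindR_A board W a with
      | none => rw [hRa] at hfa; exact absurd hfa (by simp)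
      | some j' =>
        rw [hRa] at hfa
        simp only [Option.map_some, Option.some.injEq, Prod.mk.injEq] at hfa
        exact ⟨hfa.1.symm, by rw [hfa.2]⟩
    have hi0 : 0 ≤ i := by omega
    have hiH : i < H := by omega
    have hj : j ∈ PySem.List.pyRange 0 W 1 := by
      have := List.mem_of_find?_eq_some (by rw [← pvFindRA_find?]; rw [← hia.1] at hia; exact hia.2)
      exact this
    rw [PySem.List.mem_pyRange_one] at hj
    rw [hinit, hfs]
    have hrel := pvSrc_rel H W _ [] [] PySem.Dict.empty i j hi0 hiH hj.1 hj.2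
      (pvEmpty_rel H W)
    obtain ⟨hq, hrel', hwf, hqwf⟩ := hrel
    simp only [List.nil_append] at hq hrel' hwf hqwf ⊢
    exact pvLoop_rel board W H hW0 _ _ _ _ hrel' hwf hqwf
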